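-- pv_equiv track=rewrite | github.com/EastonLee/leetcode_python_solutions | 2448. Minimum Cost to Make Array Equal.py | minValueOfFunction
-- ===== SOURCE A (Python) =====
-- from typing import List
--
-- def minValueOfFunction(start: int, end: int, nums: List[int], cost: List[int]) -> int:
--     if start == end:
--         return sum([cost[i] * abs(nums[i] - start) for i in range(len(nums))])
--
--     mid = (start + end) // 2
--     if sum([cost[i] * abs(nums[i] - mid) for i in range(len(nums))]) < sum(
--             [cost[i] * abs(nums[i] - (mid + 1)) for i in range(len(nums))]):
--         return minValueOfFunction(start, mid, nums, cost)
--     else: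
--         return minValueOfFunction(mid + 1, end, nums, cost)
-- ===== SOURCE B (Python) =====
-- from typing import List
--
-- def minValueOfFunction(start: int, end: int, nums: List[int], cost: List[int]) -> int:
--     pairs = sorted(zip(nums, cost), key=lambda p: p[0])
--     ns = [p[0] for p in pairs]
--     pc = [0]
--     for p in pairs:
--         pc.append(pc[-1] + p[1])
--     pnc = [0]
--     for p in pairs:
--         pnc.append(pnc[-1] + p[0] * p[1])
--     C = pc[-1]
--     NC = pnc[-1]
--
--     def rank(x):  # number of elements of sorted ns that are <= x (bisect_right)
--         lo, hi = 0, len(ns)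
--         while lo < hi:
--             m = (lo + hi) // 2
--             if ns[m] <= x:
--                 lo = m + 1
--             else:
--                 hi = m
--         return lo
--
--     lo, hi = start, end
--     while lo < hi:
--         mid = (lo + hi) // 2
--         if 2 * pc[rank(mid)] > C:
--             hi = mid
--         else:
--             lo = mid + 1
--     k = rank(lo)
--     return lo * pc[k] - pnc[k] + (NC - pnc[k]) - lo * (C - pc[k])
-- ===== Notes on version B (the rewrite author's own statement) =====
-- stated objective: faster
-- what changed: B sorts the (num,cost) pairs once and builds prefix sums, then runs the interval binary search with the per-step O(n) weighted-absolute-sum comparisons replaced by an O(log n) prefix-sum/bisect sign test 2*W(mid) > C (identical to comparing f(mid) < f(mid+1)), evaluating the cost once at the end from the prefix sums.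
import Mathlib
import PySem

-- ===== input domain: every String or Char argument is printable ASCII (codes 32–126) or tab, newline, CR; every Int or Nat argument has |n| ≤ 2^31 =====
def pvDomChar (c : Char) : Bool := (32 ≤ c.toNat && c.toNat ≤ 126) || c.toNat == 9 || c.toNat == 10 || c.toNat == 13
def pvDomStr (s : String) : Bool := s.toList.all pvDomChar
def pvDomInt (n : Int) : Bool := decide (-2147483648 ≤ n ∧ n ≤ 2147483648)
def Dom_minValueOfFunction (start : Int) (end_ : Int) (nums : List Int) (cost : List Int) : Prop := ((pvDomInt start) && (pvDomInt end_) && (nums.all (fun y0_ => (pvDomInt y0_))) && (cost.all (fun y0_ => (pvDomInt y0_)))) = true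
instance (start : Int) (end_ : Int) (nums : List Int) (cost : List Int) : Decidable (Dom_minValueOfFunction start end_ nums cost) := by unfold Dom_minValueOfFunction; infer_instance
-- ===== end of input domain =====

-- B replaces A's per-step O(n) weighted-abs-sum comparisons by a sort + prefix sums + bisect,
-- so each binary-search step costs O(log n) and the cost is evaluated once at the end (faster, asymptotic).

-- ===== PORT A =====
-- sum([cost[i] * abs(nums[i] - x) for i in range(len(nums))]); indices are in range under Pre_
def pvSumA (x : Int) (nums : List Int) (cost : List Int) : Int :=
  ((PySem.List.pyRange 0 (PySem.List.len nums)).map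
    (fun i => PySem.List.pyGetD cost i 0 * |PySem.List.pyGetD nums i 0 - x|)).sum

def minValueOfFunction (start : Int) (end_ : Int) (nums : List Int) (cost : List Int) : Int :=
  if start = end_ then pvSumA start nums cost
  else if h : start < end_ then
    let mid := PySem.Int.floordiv (start + end_) 2
    if pvSumA mid nums cost < pvSumA (mid + 1) nums cost then
      minValueOfFunction start mid nums cost
    else
      minValueOfFunction (mid + 1) end_ nums cost
  else pvSumA start nums cost
    -- Python never terminates when end_ < start (RecursionError); outside Pre_, value irrelevant
termination_by (end_ - start).toNat
decreasing_by
  · have _h1 := (PySem.Int.floordiv_two_mid_bounds (le_of_lt h)).1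
    have _h2 := (PySem.Int.floordiv_lt_iff_lt_mul (a := start + end_) (b := 2) (q := end_)
      (by norm_num)).mpr (by omega)
    omega
  · have _h1 := (PySem.Int.floordiv_two_mid_bounds (le_of_lt h)).1
    omega

-- ===== PORT B =====
-- def rank(x): hand-written bisect_right over the sorted keys ns
def pvRankLoop (ns : List Int) (x : Int) (lo : Int) (hi : Int) : Int :=
  if h : lo < hi then
    let m := PySem.Int.floordiv (lo + hi) 2
    if PySem.List.pyGetD ns m 0 ≤ x then pvRankLoop ns x (m + 1) hi
    else pvRankLoop ns x lo m
  else lo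
termination_by (hi - lo).toNat
decreasing_by
  · have _h1 := (PySem.Int.floordiv_two_mid_bounds (le_of_lt h)).1
    omega
  · have _h1 := (PySem.Int.floordiv_two_mid_bounds (le_of_lt h)).1
    have _h2 := (PySem.Int.floordiv_lt_iff_lt_mul (a := lo + hi) (b := 2) (q := hi)
      (by norm_num)).mpr (by omega)
    omega

def pvRank (ns : List Int) (x : Int) : Int := pvRankLoop ns x 0 (PySem.List.len ns)

-- 'acc = [0]; for p in pairs: acc.append(acc[-1] + f(p))'
def pvScan (f : Int × Int → Int) (pairs : List (Int × Int)) : List Int :=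
  pairs.foldl (fun acc p => acc ++ [PySem.List.pyGetD acc (-1) 0 + f p]) [0]

-- 'while lo < hi: mid = (lo+hi)//2; if 2*pc[rank(mid)] > C: hi = mid else: lo = mid+1'
def pvLoopB (ns : List Int) (pc : List Int) (C : Int) (lo : Int) (hi : Int) : Int :=
  if h : lo < hi then
    let mid := PySem.Int.floordiv (lo + hi) 2
    if 2 * PySem.List.pyGetD pc (pvRank ns mid) 0 > C then pvLoopB ns pc C lo mid
    else pvLoopB ns pc C (mid + 1) hi
  else lo
termination_by (hi - lo).toNat
decreasing_by
  · have _h1 := (PySem.Int.floordiv_two_mid_bounds (le_of_lt h)).1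
    have _h2 := (PySem.Int.floordiv_lt_iff_lt_mul (a := lo + hi) (b := 2) (q := hi)
      (by norm_num)).mpr (by omega)
    omega
  · have _h1 := (PySem.Int.floordiv_two_mid_bounds (le_of_lt h)).1
    omega

def minValueOfFunction_alt (start : Int) (end_ : Int) (nums : List Int) (cost : List Int) : Int :=
  let pairs := PySem.List.sorted (nums.zip cost) (fun p => p.1)
  let ns := pairs.map (fun p => p.1)
  let pc := pvScan (fun p => p.2) pairs
  let pnc := pvScan (fun p => p.1 * p.2) pairs
  let C := PySem.List.pyGetD pc (-1) 0
  let NC := PySem.List.pyGetD pnc (-1) 0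
  let lo := pvLoopB ns pc C start end_
  let k := pvRank ns lo
  lo * PySem.List.pyGetD pc k 0 - PySem.List.pyGetD pnc k 0 + (NC - PySem.List.pyGetD pnc k 0)
    - lo * (C - PySem.List.pyGetD pc k 0)

-- ===== PRECONDITION & SPEC =====
-- Pre_ is exactly where A returns: A recurses forever when start > end_ (RecursionError)
-- and raises IndexError when cost is shorter than nums.
def Pre_minValueOfFunction (start : Int) (end_ : Int) (nums : List Int) (cost : List Int) : Prop :=
  start ≤ end_ ∧ nums.length ≤ cost.length
instance (start : Int) (end_ : Int) (nums : List Int) (cost : List Int) : Decidable (Pre_minValueOfFunction start end_ nums cost) := by unfold Pre_minValueOfFunction; infer_instance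

def pvWitness_minValueOfFunction : Int × Int × List Int × List Int := (0, 2, [1, 2], [3, 4])

def Spec_minValueOfFunction (start : Int) (end_ : Int) (nums : List Int) (cost : List Int) (out : Int) : Prop := out = minValueOfFunction_alt start end_ nums cost
instance (start : Int) (end_ : Int) (nums : List Int) (cost : List Int) (out : Int) : Decidable (Spec_minValueOfFunction start end_ nums cost out) := by unfold Spec_minValueOfFunction; infer_instance

-- ===== CLAIM (what is proved, stated in full; the proofs are below) =====
def Claim_equal_minValueOfFunction : Prop := ∀ (start : Int) (end_ : Int) (nums : List Int) (cost : List Int), Dom_minValueOfFunction start end_ nums cost → Pre_minValueOfFunction start end_ nums cost → Spec_minValueOfFunction start end_ nums cost (minValueOfFunction start end_ nums cost)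


-- ===== LEMMAS AND PROOFS =====

-- the total weighted L1 cost, the weight/weighted-value sums below x, and the two totals
def pvF (z : List (Int × Int)) (x : Int) : Int := (z.map (fun p => p.2 * |p.1 - x|)).sum
def pvW (z : List (Int × Int)) (x : Int) : Int :=
  ((z.filter (fun p => decide (p.1 ≤ x))).map (fun p => p.2)).sum
def pvWn (z : List (Int × Int)) (x : Int) : Int :=
  ((z.filter (fun p => decide (p.1 ≤ x))).map (fun p => p.1 * p.2)).sum
def pvSc (z : List (Int × Int)) : Int := (z.map (fun p => p.2)).sum
def pvSn (z : List (Int × Int)) : Int := (z.map (fun p => p.1 * p.2)).sum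

-- the abstract binary search both ports implement
def pvBS (z : List (Int × Int)) (lo : Int) (hi : Int) : Int :=
  if h : lo < hi then
    let m := PySem.Int.floordiv (lo + hi) 2
    if 2 * pvW z m > pvSc z then pvBS z lo m else pvBS z (m + 1) hi
  else lo
termination_by (hi - lo).toNat
decreasing_by
  · have _h1 := (PySem.Int.floordiv_two_mid_bounds (le_of_lt h)).1
    have _h2 := (PySem.Int.floordiv_lt_iff_lt_mul (a := lo + hi) (b := 2) (q := hi)
      (by norm_num)).mpr (by omega)
    omega
  · have _h1 := (PySem.Int.floordiv_two_mid_bounds (le_of_lt h)).1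
    omega

lemma pvF_sub (z : List (Int × Int)) (x : Int) :
    pvF z x - pvF z (x + 1) = pvSc z - 2 * pvW z x := by
  induction z with
  | nil => simp [pvF, pvW, pvSc]
  | cons p t ih =>
    by_cases hp : p.1 ≤ x
    · simp only [pvF, pvW, pvSc, List.map_cons, List.sum_cons, List.filter_cons] at *
      rw [abs_of_nonpos (by omega), abs_of_nonpos (by omega)]
      simp [hp] at *
      linarith
    · simp only [pvF, pvW, pvSc, List.map_cons, List.sum_cons, List.filter_cons] at *
      rw [abs_of_nonneg (by omega), abs_of_nonneg (by omega)]
      simp [hp] at *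
      linarith

lemma pvF_formula (z : List (Int × Int)) (x : Int) :
    pvF z x = x * pvW z x - pvWn z x + (pvSn z - pvWn z x) - x * (pvSc z - pvW z x) := by
  induction z with
  | nil => simp [pvF, pvW, pvWn, pvSc, pvSn]
  | cons p t ih =>
    by_cases hp : p.1 ≤ x
    · simp only [pvF, pvW, pvWn, pvSc, pvSn, List.map_cons, List.sum_cons, List.filter_cons] at *
      rw [abs_of_nonpos (by omega)]
      simp [hp] at *
      linarith
    · simp only [pvF, pvW, pvWn, pvSc, pvSn, List.map_cons, List.sum_cons, List.filter_cons] at *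
      rw [abs_of_nonneg (by omega)]
      simp [hp] at *
      linarith

lemma sum_range_zip (x : Int) : ∀ (nums cost : List Int), nums.length ≤ cost.length →
    ((List.range nums.length).map (fun i => cost.getD i 0 * |nums.getD i 0 - x|)).sum
      = pvF (nums.zip cost) x := by
  intro nums
  induction nums with
  | nil => intro cost _; simp [pvF]
  | cons n t ih =>
    intro cost hlen
    cases cost with
    | nil => simp at hlen
    | cons c cs =>
      simp only [List.length_cons, List.range_succ_eq_map, List.map_cons, List.map_map,
        List.sum_cons, List.zip_cons_cons, pvF]
      have := ih cs (by simpa using hlen)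
      simp only [List.getD_cons_zero, Function.comp_def, Nat.succ_eq_add_one,
        List.getD_cons_succ, pvF] at *
      rw [this]

lemma pvSumA_eq (x : Int) (nums cost : List Int) (hlen : nums.length ≤ cost.length) :
    pvSumA x nums cost = pvF (nums.zip cost) x := by
  unfold pvSumA
  have hl : PySem.List.len nums = (nums.length : Int) := by simp [PySem.List.len]
  rw [hl, PySem.List.pyRange_zero_natCast, List.map_map]
  have : ((fun i => PySem.List.pyGetD cost i 0 * |PySem.List.pyGetD nums i 0 - x|) ∘ fun k : Nat => (k : Int))
      = fun i : Nat => cost.getD i 0 * |nums.getD i 0 - x| := by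
    funext i
    simp [PySem.List.pyGetD_natCast]
  rw [this, sum_range_zip x nums cost hlen]

lemma pyGetD_neg_one (xs : List Int) (d : Int) :
    PySem.List.pyGetD xs (-1) d = xs.getD (xs.length - 1) d := by
  simp only [PySem.List.pyGetD, PySem.List.pyGet?, PySem.List.pyIdx?]
  by_cases h : 1 ≤ xs.length
  · simp [h, List.getD_eq_getElem?_getD]
  · have : xs = [] := by
      cases xs with
      | nil => rfl
      | cons a t => simp at h
    subst this; simp

lemma pvScan_eq (f : Int × Int → Int) (ps : List (Int × Int)) :
    pvScan f ps = (List.range (ps.length + 1)).map (fun k => ((ps.take k).map f).sum) := by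
  induction ps using List.reverseRecOn with
  | nil => simp [pvScan]
  | append_singleton qs p ih =>
    have hlast : PySem.List.pyGetD (pvScan f qs) (-1) 0 = (qs.map f).sum := by
      rw [ih, pyGetD_neg_one]
      simp only [List.length_map, List.length_range]
      rw [show qs.length + 1 - 1 = qs.length by omega]
      rw [List.getD_eq_getElem?_getD]
      simp only [List.getElem?_map, List.getElem?_range (by omega : qs.length < qs.length + 1)]
      simp only [Option.map_some, Option.getD_some]
      rw [List.take_of_length_le (by simp)]
    unfold pvScan at *
    rw [List.foldl_append]
    simp only [List.foldl_cons, List.foldl_nil]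
    rw [hlast, ih]
    conv_rhs => rw [show (qs ++ [p]).length + 1 = (qs.length + 1) + 1 by simp, List.range_succ,
      List.map_append]
    congr 1
    · apply List.map_congr_left
      intro k hk
      simp only [List.mem_range] at hk
      rw [List.take_append_of_le_length (by omega)]
    · simp only [List.map_cons, List.map_nil]
      rw [List.take_of_length_le (by simp)]
      simp

lemma pvScan_getD (f : Int × Int → Int) (ps : List (Int × Int)) (k : Nat) (hk : k ≤ ps.length) :
    PySem.List.pyGetD (pvScan f ps) (k : Int) 0 = ((ps.take k).map f).sum := by
  rw [PySem.List.pyGetD_natCast, pvScan_eq]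
  rw [List.getD_eq_getElem?_getD]
  simp only [List.getElem?_map, List.getElem?_range (by omega : k < ps.length + 1)]
  simp

lemma pvScan_last (f : Int × Int → Int) (ps : List (Int × Int)) :
    PySem.List.pyGetD (pvScan f ps) (-1) 0 = (ps.map f).sum := by
  rw [pyGetD_neg_one, pvScan_eq]
  simp only [List.length_map, List.length_range]
  rw [show ps.length + 1 - 1 = ps.length by omega]
  rw [List.getD_eq_getElem?_getD]
  simp only [List.getElem?_map, List.getElem?_range (by omega : ps.length < ps.length + 1)]
  simp only [Option.map_some, Option.getD_some]
  rw [List.take_of_length_le (by simp)]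

lemma pvRankLoop_props (ns : List Int) (x : Int) (hs : List.Pairwise (· ≤ ·) ns) :
    ∀ (lo hi : Nat), hi ≤ ns.length → lo ≤ hi →
      (∀ (j : Nat) (hj : j < ns.length), j < lo → ns[j] ≤ x) →
      (∀ (j : Nat) (hj : j < ns.length), hi ≤ j → x < ns[j]) →
      ∃ r : Nat, pvRankLoop ns x (lo : Int) (hi : Int) = (r : Int) ∧ r ≤ ns.length ∧
        (∀ (j : Nat) (hj : j < ns.length), j < r → ns[j] ≤ x) ∧
        (∀ (j : Nat) (hj : j < ns.length), r ≤ j → x < ns[j]) := by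
  intro lo hi
  generalize hd : hi - lo = n
  induction n using Nat.strong_induction_on generalizing lo hi with
  | _ n ih =>
    intro hhi hlh hbelow habove
    by_cases h : lo < hi
    · rw [pvRankLoop]
      have hcast : (lo : Int) < (hi : Int) := by exact_mod_cast h
      rw [dif_pos hcast]
      have hmid : PySem.Int.floordiv ((lo : Int) + (hi : Int)) 2 = (((lo + hi) / 2 : Nat) : Int) := by
        rw [show (lo : Int) + (hi : Int) = ((lo + hi : Nat) : Int) by push_cast; ring]
        exact_mod_cast PySem.Int.floordiv_natCast (lo + hi) 2
      set mN := (lo + hi) / 2 with hmN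
      have hm1 : lo ≤ mN := by omega
      have hm2 : mN < hi := by omega
      have hmlt : mN < ns.length := by omega
      have hget : PySem.List.pyGetD ns ((mN : Nat) : Int) 0 = ns[mN] := by
        rw [PySem.List.pyGetD_natCast, List.getD_eq_getElem?_getD]
        simp [List.getElem?_eq_getElem hmlt]
      have hpw := List.pairwise_iff_getElem.mp hs
      simp only [hmid, hget]
      by_cases hc : ns[mN] ≤ x
      · rw [if_pos hc]
        have := ih (hi - (mN + 1)) (by omega) (mN + 1) hi (by omega) hhi (by omega)
          (fun j hj hjlt => by
            rcases lt_or_ge j mN with hj2 | hj2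
            · exact le_trans (hpw j mN hj hmlt hj2) hc
            · have : j = mN := by omega
              subst this; exact hc)
          habove
        exact_mod_cast this
      · rw [if_neg hc]
        rw [not_le] at hc
        have := ih (mN - lo) (by omega) lo mN (by omega) (by omega) (by omega) hbelow
          (fun j hj hjge => by
            rcases lt_or_ge mN j with hj2 | hj2
            · exact lt_of_lt_of_le hc (hpw mN j hmlt hj hj2)
            · have : j = mN := by omega
              subst this; exact hc)
        exact_mod_cast this
    · rw [pvRankLoop]
      rw [dif_neg (by exact_mod_cast h)]
      exact ⟨lo, rfl, by omega, hbelow, fun j hj hjge => habove j hj (by omega)⟩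

lemma pvRank_props (ns : List Int) (x : Int) (hs : List.Pairwise (· ≤ ·) ns) :
    ∃ r : Nat, pvRank ns x = (r : Int) ∧ r ≤ ns.length ∧
      (∀ (j : Nat) (hj : j < ns.length), j < r → ns[j] ≤ x) ∧
      (∀ (j : Nat) (hj : j < ns.length), r ≤ j → x < ns[j]) := by
  have hlen : PySem.List.len ns = ((ns.length : Nat) : Int) := by simp [PySem.List.len]
  have := pvRankLoop_props ns x hs 0 ns.length (le_refl _) (by omega)
    (fun j hj hjlt => absurd hjlt (by omega)) (fun j hj hjge => absurd hjge (by omega))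
  unfold pvRank
  rw [hlen]
  exact_mod_cast this

lemma pvA_eq (nums cost : List Int) (hlen : nums.length ≤ cost.length) :
    ∀ (start end_ : Int), start ≤ end_ →
      minValueOfFunction start end_ nums cost = pvF (nums.zip cost) (pvBS (nums.zip cost) start end_) := by
  intro start end_ hse
  generalize hn : (end_ - start).toNat = n
  induction n using Nat.strong_induction_on generalizing start end_ with
  | _ n ih =>
    by_cases heq : start = end_
    · subst heq
      rw [minValueOfFunction, pvBS]
      simp only [lt_irrefl]
      exact pvSumA_eq start nums cost hlen
    · have hlt : start < end_ := by omega
      have hm1 := (PySem.Int.floordiv_two_mid_bounds (le_of_lt hlt)).1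
      have hm2 := (PySem.Int.floordiv_lt_iff_lt_mul (a := start + end_) (b := 2) (q := end_)
        (by norm_num)).mpr (by omega)
      rw [minValueOfFunction, pvBS]
      simp only [heq, hlt, if_false, dif_pos]
      set m := PySem.Int.floordiv (start + end_) 2 with hm
      have hcond : (pvSumA m nums cost < pvSumA (m + 1) nums cost)
          ↔ (2 * pvW (nums.zip cost) m > pvSc (nums.zip cost)) := by
        rw [pvSumA_eq m nums cost hlen, pvSumA_eq (m+1) nums cost hlen]
        have := pvF_sub (nums.zip cost) m
        constructor <;> intro h <;> omega
      by_cases hc : 2 * pvW (nums.zip cost) m > pvSc (nums.zip cost)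
      · rw [if_pos (hcond.mpr hc), if_pos hc]
        exact ih (m - start).toNat (by omega) start m (by omega) rfl
      · rw [if_neg (fun h => hc (hcond.mp h)), if_neg hc]
        exact ih (end_ - (m+1)).toNat (by omega) (m+1) end_ (by omega) rfl


lemma pvFilter_eq_take (ps : List (Int × Int)) (x : Int) (r : Nat) (hr : r ≤ ps.length)
    (h1 : ∀ (j : Nat) (hj : j < ps.length), j < r → ps[j].1 ≤ x)
    (h2 : ∀ (j : Nat) (hj : j < ps.length), r ≤ j → x < ps[j].1) :
    ps.filter (fun p => decide (p.1 ≤ x)) = ps.take r := by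
  conv_lhs => rw [← List.take_append_drop r ps]
  rw [List.filter_append]
  have htake : (ps.take r).filter (fun p => decide (p.1 ≤ x)) = ps.take r := by
    rw [List.filter_eq_self]
    intro a ha
    rw [List.mem_iff_getElem] at ha
    obtain ⟨j, hj, rfl⟩ := ha
    have hjr : j < r := by
      have := hj; simp [List.length_take] at this; omega
    rw [List.getElem_take]
    simpa using h1 j (by omega) hjr
  have hdrop : (ps.drop r).filter (fun p => decide (p.1 ≤ x)) = [] := by
    rw [List.filter_eq_nil_iff]
    intro a ha
    rw [List.mem_iff_getElem] at ha
    obtain ⟨j, hj, rfl⟩ := ha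
    rw [List.getElem_drop]
    have hlen : j < ps.length - r := by simpa using hj
    have := h2 (r + j) (by omega) (by omega)
    simp only [decide_eq_true_eq]
    omega
  rw [htake, hdrop, List.append_nil]

lemma pvB_eq (nums cost : List Int) (start end_ : Int) :
    minValueOfFunction_alt start end_ nums cost = pvF (nums.zip cost) (pvBS (nums.zip cost) start end_) := by
  set z := nums.zip cost with hz
  set sp := PySem.List.sorted z (fun p => p.1) with hsp
  have hperm : sp.Perm z := PySem.List.sorted_perm z (fun p => p.1) false
  have hpw : List.Pairwise (fun a b => a.1 ≤ b.1) sp := PySem.List.sorted_pairwise z (fun p => p.1)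
  set ns := sp.map (fun p => p.1) with hns
  have hnspw : List.Pairwise (· ≤ ·) ns := by
    rw [hns]
    exact List.Pairwise.map (fun p : Int × Int => p.1) (fun a b h => h) hpw
  have hlen_ns : ns.length = sp.length := by simp [hns]
  have hfil : ∀ (f : Int × Int → Int) (m : Int),
      ((sp.filter (fun p => decide (p.1 ≤ m))).map f).sum
        = ((z.filter (fun p => decide (p.1 ≤ m))).map f).sum :=
    fun f m => ((hperm.filter _).map f).sum_eq
  have htot : ∀ (f : Int × Int → Int), (sp.map f).sum = (z.map f).sum :=
    fun f => (hperm.map f).sum_eq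
  have hkey : ∀ (f : Int × Int → Int) (m : Int),
      PySem.List.pyGetD (pvScan f sp) (pvRank ns m) 0
        = ((z.filter (fun p => decide (p.1 ≤ m))).map f).sum := by
    intro f m
    obtain ⟨r, hre, hrle, hb, ha⟩ := pvRank_props ns m hnspw
    rw [hre, pvScan_getD f sp r (by omega)]
    rw [← pvFilter_eq_take sp m r (by omega)
      (fun j hj hjr => by
        have := hb j (by omega) hjr
        simpa [hns] using this)
      (fun j hj hjr => by
        have := ha j (by omega) hjr
        simpa [hns] using this)]
    exact hfil f m
  have hC : PySem.List.pyGetD (pvScan (fun p => p.2) sp) (-1) 0 = pvSc z := by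
    rw [pvScan_last]; exact htot _
  have hNC : PySem.List.pyGetD (pvScan (fun p => p.1 * p.2) sp) (-1) 0 = pvSn z := by
    rw [pvScan_last]; exact htot _
  have hloop : ∀ (lo hi : Int),
      pvLoopB ns (pvScan (fun p => p.2) sp) (PySem.List.pyGetD (pvScan (fun p => p.2) sp) (-1) 0) lo hi
        = pvBS z lo hi := by
    intro lo hi
    generalize hn : (hi - lo).toNat = n
    induction n using Nat.strong_induction_on generalizing lo hi with
    | _ n ih =>
      rw [pvLoopB, pvBS]
      by_cases h : lo < hi
      · rw [dif_pos h, dif_pos h]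
        have hm1 := (PySem.Int.floordiv_two_mid_bounds (le_of_lt h)).1
        have hm2 := (PySem.Int.floordiv_lt_iff_lt_mul (a := lo + hi) (b := 2) (q := hi)
          (by norm_num)).mpr (by omega)
        set m := PySem.Int.floordiv (lo + hi) 2 with hm
        have hpred : (2 * PySem.List.pyGetD (pvScan (fun p => p.2) sp)
            (pvRank ns m) 0 > PySem.List.pyGetD (pvScan (fun p => p.2) sp) (-1) 0)
            ↔ (2 * pvW z m > pvSc z) := by
          rw [hkey (fun p => p.2) m, hC]
          rfl
        by_cases hc : 2 * pvW z m > pvSc z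
        · rw [if_pos (hpred.mpr hc), if_pos hc]
          exact ih (m - lo).toNat (by omega) lo m (by omega)
        · rw [if_neg (fun hx => hc (hpred.mp hx)), if_neg hc]
          exact ih (hi - (m + 1)).toNat (by omega) (m + 1) hi (by omega)
      · rw [dif_neg h, dif_neg h]
  simp only [minValueOfFunction_alt, ← hz, ← hsp, ← hns]
  rw [hloop start end_]
  rw [hkey (fun p => p.2) (pvBS z start end_), hkey (fun p => p.1 * p.2) (pvBS z start end_),
    hC, hNC, pvF_formula z (pvBS z start end_)]
  rfl

-- ===== VERDICT (by name: the statement is the Claim_ definition above) =====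
theorem minValueOfFunction_spec : Claim_equal_minValueOfFunction := by
  intro start end_ nums cost _ hpre
  unfold Spec_minValueOfFunction
  rw [pvA_eq nums cost hpre.2 start end_ hpre.1, pvB_eq]
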